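-- pv_equiv track=rewrite | github.com/MrBrantCode/unitest_baseline | mut_generate/mist_train_cf/cf_96863/solution.py | determine_order
-- ===== SOURCE A (Python) =====
-- def determine_order(arr):
--     # Check if the array is strictly increasing
--     if all(arr[i] < arr[i + 1] for i in range(len(arr) - 1)):
--         return "Strictly Increasing"
--
--     # Check if the array is strictly decreasing
--     if all(arr[i] > arr[i + 1] for i in range(len(arr) - 1)):
--         return "Strictly Decreasing"
--
--     # Check if the array is non-decreasing
--     if all(arr[i] <= arr[i + 1] for i in range(len(arr) - 1)):
--         return "Non-decreasing"
--
--     # Check if the array is non-increasing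
--     if all(arr[i] >= arr[i + 1] for i in range(len(arr) - 1)):
--         return "Non-increasing"
--
--     # If none of the above conditions are met, the array is unordered
--     return "Unordered"
-- ===== SOURCE B (Python) =====
-- def determine_order(arr):
--     # Count the comparison sign of each adjacent pair in one pass.
--     n_lt = n_eq = n_gt = 0
--     for x, y in zip(arr, arr[1:]):
--         if x < y:
--             n_lt += 1
--         elif x > y:
--             n_gt += 1
--         else:
--             n_eq += 1
--     # Derive the class from which signs occurred (integer trichotomy).
--     if n_gt == 0 and n_eq == 0:
--         return "Strictly Increasing"
--     if n_lt == 0 and n_eq == 0: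
--         return "Strictly Decreasing"
--     if n_gt == 0:
--         return "Non-decreasing"
--     if n_lt == 0:
--         return "Non-increasing"
--     return "Unordered"
-- ===== Notes on version B (the rewrite author's own statement) =====
-- stated objective: alternative
-- what changed: Instead of A's four separate predicate scans, B makes one pass that buckets each adjacent pair by its comparison sign into three counters and then classifies from which counters are zero, using integer trichotomy.
import Mathlib
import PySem

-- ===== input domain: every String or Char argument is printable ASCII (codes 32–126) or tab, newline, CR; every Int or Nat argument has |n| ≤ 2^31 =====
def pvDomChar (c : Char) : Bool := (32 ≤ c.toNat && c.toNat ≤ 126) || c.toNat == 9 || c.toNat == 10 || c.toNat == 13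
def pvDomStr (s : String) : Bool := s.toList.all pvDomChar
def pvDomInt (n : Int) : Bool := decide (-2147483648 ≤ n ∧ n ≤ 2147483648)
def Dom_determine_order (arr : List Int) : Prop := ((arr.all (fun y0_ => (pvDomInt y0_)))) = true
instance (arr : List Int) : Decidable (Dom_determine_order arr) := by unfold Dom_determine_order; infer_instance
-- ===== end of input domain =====

-- B replaces A's four predicate scans by one counting pass over the comparison signs of adjacent pairs, classifying from which counters are zero (objective: alternative, same cost).

-- ===== PORT A =====
-- Each `all(... for i in range(len(arr)-1))` is ported as `.all` over `List.range (len-1)`;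
-- the indices i and i+1 are always in range, so `getD _ 0` is exact there (Python never raises here).
def determine_order (arr : List Int) : String :=
  if (List.range (arr.length - 1)).all (fun i => decide (arr.getD i 0 < arr.getD (i+1) 0)) then
    "Strictly Increasing"
  else if (List.range (arr.length - 1)).all (fun i => decide (arr.getD i 0 > arr.getD (i+1) 0)) then
    "Strictly Decreasing"
  else if (List.range (arr.length - 1)).all (fun i => decide (arr.getD i 0 ≤ arr.getD (i+1) 0)) then
    "Non-decreasing"
  else if (List.range (arr.length - 1)).all (fun i => decide (arr.getD i 0 ≥ arr.getD (i+1) 0)) then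
    "Non-increasing"
  else
    "Unordered"

-- ===== PORT B =====
-- zip(arr, arr[1:]) → arr.zip arr.tail; the for-loop is a foldl carrying the three counters (n_lt, n_eq, n_gt).
def determine_order_alt (arr : List Int) : String :=
  let c := (arr.zip arr.tail).foldl
    (fun (c : Int × Int × Int) p =>
      if p.1 < p.2 then (c.1 + 1, c.2.1, c.2.2)
      else if p.1 > p.2 then (c.1, c.2.1, c.2.2 + 1)
      else (c.1, c.2.1 + 1, c.2.2))
    (0, 0, 0)
  if c.2.2 = 0 ∧ c.2.1 = 0 then "Strictly Increasing"
  else if c.1 = 0 ∧ c.2.1 = 0 then "Strictly Decreasing"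
  else if c.2.2 = 0 then "Non-decreasing"
  else if c.1 = 0 then "Non-increasing"
  else "Unordered"

-- ===== PRECONDITION & SPEC =====
def Spec_determine_order (arr : List Int) (out : String) : Prop := out = determine_order_alt arr
instance (arr : List Int) (out : String) : Decidable (Spec_determine_order arr out) := by unfold Spec_determine_order; infer_instance

-- ===== CLAIM (what is proved, stated in full; the proofs are below) =====
def Claim_equal_determine_order : Prop := ∀ (arr : List Int), Dom_determine_order arr → Spec_determine_order arr (determine_order arr)

-- ===== LEMMAS AND PROOFS =====

-- A's range-indexed `all` equals the `all` over adjacent pairs.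
theorem all_range_eq_all_zip (r : Int → Int → Bool) :
    ∀ (l : List Int),
      (List.range (l.length - 1)).all (fun i => r (l.getD i 0) (l.getD (i+1) 0))
        = (l.zip l.tail).all (fun p => r p.1 p.2) := by
  intro l
  match l with
  | [] => simp
  | [a] => simp
  | a :: b :: t =>
    have ih := all_range_eq_all_zip r (b :: t)
    simp only [List.length_cons, Nat.add_sub_cancel, List.range_succ_eq_map,
      List.all_cons, List.all_map, List.tail_cons, List.zip_cons_cons] at *
    simp only [List.getD_cons_zero, List.getD_cons_succ]
    have h : ((fun i => r ((a :: b :: t).getD i 0) ((b :: t).getD i 0)) ∘ Nat.succ)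
        = (fun i => r ((b :: t).getD i 0) ((b :: t).getD (i+1) 0)) := by
      funext i; simp
    rw [h, ih]

-- B's fold accumulates, in each component, the count of pairs with that comparison sign.
theorem fold_counts (ps : List (Int × Int)) (c : Int × Int × Int) :
    ps.foldl
      (fun (c : Int × Int × Int) p =>
        if p.1 < p.2 then (c.1 + 1, c.2.1, c.2.2)
        else if p.1 > p.2 then (c.1, c.2.1, c.2.2 + 1)
        else (c.1, c.2.1 + 1, c.2.2)) c
      = (c.1 + (ps.countP (fun p => decide (p.1 < p.2)) : Int),
         c.2.1 + (ps.countP (fun p => decide (¬ p.1 < p.2 ∧ ¬ p.1 > p.2)) : Int),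
         c.2.2 + (ps.countP (fun p => decide (p.1 > p.2)) : Int)) := by
  induction ps generalizing c with
  | nil => simp
  | cons p ps ih =>
    simp only [List.foldl_cons, ih, List.countP_cons]
    by_cases h1 : p.1 < p.2
    · simp only [h1, if_pos]
      refine Prod.ext ?_ (Prod.ext ?_ ?_) <;> simp [h1, not_lt_of_gt h1] <;> ring
    · by_cases h2 : p.1 > p.2
      · simp only [h1, h2, if_pos]
        refine Prod.ext ?_ (Prod.ext ?_ ?_) <;> simp [h1, h2] <;> ring
      · simp only [h1, h2]
        refine Prod.ext ?_ (Prod.ext ?_ ?_) <;> simp [h1, h2] <;> ring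

-- countP = 0 ↔ all pairs fail the predicate.
theorem countP_zero_iff (q : Int × Int → Bool) (ps : List (Int × Int)) :
    ((ps.countP q : Int) = 0) ↔ ∀ p ∈ ps, ¬ q p = true := by
  rw [Int.natCast_eq_zero, List.countP_eq_zero]

-- ===== VERDICT (by name: the statement is the Claim_ definition above) =====
theorem determine_order_spec : Claim_equal_determine_order := by
  intro arr _
  unfold Spec_determine_order determine_order determine_order_alt
  simp only [fold_counts, zero_add,
    all_range_eq_all_zip (fun a b => decide (a < b)) arr,
    all_range_eq_all_zip (fun a b => decide (a > b)) arr,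
    all_range_eq_all_zip (fun a b => decide (a ≤ b)) arr,
    all_range_eq_all_zip (fun a b => decide (a ≥ b)) arr,
    List.all_eq_true, countP_zero_iff, decide_eq_true_eq]
  have e1 : ((∀ x ∈ arr.zip arr.tail, x.1 ≤ x.2) ∧ ∀ p ∈ arr.zip arr.tail, ¬(¬p.1 < p.2 ∧ ¬p.1 > p.2))
      ↔ (∀ x ∈ arr.zip arr.tail, x.1 < x.2) := by
    constructor
    · rintro ⟨hg, he⟩ p hp; have := hg p hp; have := he p hp; omega
    · intro h
      exact ⟨fun p hp => by have := h p hp; omega, fun p hp => by have := h p hp; omega⟩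
  have e2 : ((∀ x ∈ arr.zip arr.tail, x.1 ≥ x.2) ∧ ∀ p ∈ arr.zip arr.tail, ¬(¬p.1 < p.2 ∧ ¬p.1 > p.2))
      ↔ (∀ x ∈ arr.zip arr.tail, x.1 > x.2) := by
    constructor
    · rintro ⟨hl, he⟩ p hp; have := hl p hp; have := he p hp; omega
    · intro h
      exact ⟨fun p hp => by have := h p hp; omega, fun p hp => by have := h p hp; omega⟩
  have e3 : (∀ p ∈ arr.zip arr.tail, ¬p.1 > p.2) ↔ (∀ x ∈ arr.zip arr.tail, x.1 ≤ x.2) := by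
    constructor <;> intro h p hp <;> have := h p hp <;> omega
  have e4 : (∀ p ∈ arr.zip arr.tail, ¬p.1 < p.2) ↔ (∀ x ∈ arr.zip arr.tail, x.1 ≥ x.2) := by
    constructor <;> intro h p hp <;> have := h p hp <;> omega
  simp only [e3, e4]
  simp only [e1, e2]
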